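-- pv_equiv track=rewrite | github.com/cartography-cncf/cartography | cartography/intel/gcp/policy_bindings.py | _parse_full_resource_name
-- ===== SOURCE A (Python) =====
-- _FULL_RESOURCE_NAME_TO_NODE: list[tuple[str, str, str]] = [
--     # (prefix to strip, target label, suffix template marker)
--     # Tuple semantics: (prefix, target_label, id_format)
--     #   id_format = "last"          -> take last path segment after prefix
--     #   id_format = "type_prefixed" -> keep "{type}/{id}" (e.g. "organizations/1337")
--     ("//cloudresourcemanager.googleapis.com/projects/", "GCPProject", "last"),
--     (
--         "//cloudresourcemanager.googleapis.com/folders/",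
--         "GCPFolder",
--         "type_prefixed",
--     ),
--     (
--         "//cloudresourcemanager.googleapis.com/organizations/",
--         "GCPOrganization",
--         "type_prefixed",
--     ),
--     ("//storage.googleapis.com/buckets/", "GCPBucket", "last"),
-- ]
--
-- def _parse_full_resource_name(full_name: str) -> tuple[str | None, str | None]:
--     """
--     Parse a GCP Cloud Asset full resource name and return the matching
--     (target_node_label, target_id) pair when the resource type is part of the
--     Cartography ontology, or (None, None) otherwise.
--
--     Full resource name format: //{service}.googleapis.com/{path}
--     """
--     for prefix, label, id_format in _FULL_RESOURCE_NAME_TO_NODE: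
--         if not full_name.startswith(prefix):
--             continue
--         suffix = full_name[len(prefix) :]
--         if not suffix:
--             return None, None
--         # We only match the first path segment after the prefix — policies
--         # attached to sub-resources (e.g. bucket objects) resolve back to the
--         # owning top-level resource that exists in the graph.
--         segment = suffix.split("/", 1)[0]
--         if id_format == "type_prefixed":
--             # Extract the resource type from the prefix (e.g. "folders")
--             type_name = prefix.rstrip("/").rsplit("/", 1)[-1]
--             return label, f"{type_name}/{segment}"
--         return label, segment
--     return None, None
-- ===== SOURCE B (Python) =====
-- # B: parse the name structurally (guard the leading double slash, then split into domain/type/rest)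
-- # and look the (domain, resource_type) pair up in a flat table, instead of
-- # scanning a prefix list with startswith + slicing.
-- _NODE_BY_TYPE: dict[tuple[str, str], tuple[str, str]] = {
--     ("cloudresourcemanager.googleapis.com", "projects"): ("GCPProject", "last"),
--     ("cloudresourcemanager.googleapis.com", "folders"): ("GCPFolder", "type_prefixed"),
--     ("cloudresourcemanager.googleapis.com", "organizations"): ("GCPOrganization", "type_prefixed"),
--     ("storage.googleapis.com", "buckets"): ("GCPBucket", "last"),
-- }
--
--
-- def _parse_full_resource_name(full_name: str) -> tuple[str | None, str | None]:
--     if not full_name.startswith("//"):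
--         return None, None
--     parts = full_name[2:].split("/", 2)
--     if len(parts) < 3 or not parts[2]:
--         return None, None
--     entry = _NODE_BY_TYPE.get((parts[0], parts[1]))
--     if entry is None:
--         return None, None
--     label, id_format = entry
--     segment = parts[2].split("/", 1)[0]
--     if id_format == "type_prefixed":
--         return label, f"{parts[1]}/{segment}"
--     return label, segment
-- ===== Notes on version B (the rewrite author's own statement) =====
-- stated objective: alternative
-- what changed: Replaces the linear scan over prefix strings with startswith/slicing by a structural parse: strip the leading double slash, split the remainder into domain/resource-type/rest once, and look the (domain, type) pair up in a flat table.
import Mathlib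
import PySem

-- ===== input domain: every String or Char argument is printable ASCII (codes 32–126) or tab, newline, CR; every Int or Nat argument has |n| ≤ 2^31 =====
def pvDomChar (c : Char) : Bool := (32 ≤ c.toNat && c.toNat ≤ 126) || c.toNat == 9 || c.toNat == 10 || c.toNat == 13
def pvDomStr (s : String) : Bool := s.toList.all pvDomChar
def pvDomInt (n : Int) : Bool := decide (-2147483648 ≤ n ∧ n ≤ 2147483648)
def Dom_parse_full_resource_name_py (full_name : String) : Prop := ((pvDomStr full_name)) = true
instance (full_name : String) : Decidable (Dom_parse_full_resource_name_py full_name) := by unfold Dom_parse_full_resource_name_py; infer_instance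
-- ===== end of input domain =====

-- B replaces A's linear scan over full prefix strings (startswith + slicing) by one structural
-- parse ('//' guard, one split into domain/type/rest) and a table lookup keyed by (domain, type).

-- ===== PORT A =====
def pvTableA : List (String × String × String) :=
  [("//cloudresourcemanager.googleapis.com/projects/", "GCPProject", "last"),
   ("//cloudresourcemanager.googleapis.com/folders/", "GCPFolder", "type_prefixed"),
   ("//cloudresourcemanager.googleapis.com/organizations/", "GCPOrganization", "type_prefixed"),
   ("//storage.googleapis.com/buckets/", "GCPBucket", "last")]

-- hand port of s.rstrip("/") (PySem.Str.rstrip strips whitespace only): exact — drops trailing '/' characters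
def pvRstripSlash (s : String) : String := String.ofList ((s.toList.reverse.dropWhile (· == '/')).reverse)
-- hand port of s.rsplit("/", 1)[-1] (PySem has no rsplit): exact — the part after the last '/', or s itself when s contains no '/'
def pvRsplitSlashLast (s : String) : String := String.ofList ((s.toList.reverse.takeWhile (· != '/')).reverse)

def pvLoopA : List (String × String × String) → String → Option String × Option String
  | [], _ => (none, none)
  | (pre, label, id_format) :: rows, full_name =>
    if !(PySem.Str.startswith full_name pre) then pvLoopA rows full_name
    else
      let suffix := PySem.Str.slice full_name (some (PySem.Str.len pre)) none
      if suffix = "" then (none, none)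
      else
        -- suffix.split("/", 1)[0]: split with a nonempty separator is `some` of a nonempty list, so [0] is its head
        let segment := ((PySem.Str.splitMax? suffix "/" 1).getD []).headD ""
        if id_format = "type_prefixed" then
          let type_name := pvRsplitSlashLast (pvRstripSlash pre)
          (some label, some (type_name ++ "/" ++ segment))
        else (some label, some segment)

def parse_full_resource_name_py (full_name : String) : Option String × Option String :=
  pvLoopA pvTableA full_name

-- ===== PORT B =====
def pvNodeByType : PySem.Dict (String × String) (String × String) :=
  PySem.Dict.mk
    [(("cloudresourcemanager.googleapis.com", "projects"), ("GCPProject", "last")),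
     (("cloudresourcemanager.googleapis.com", "folders"), ("GCPFolder", "type_prefixed")),
     (("cloudresourcemanager.googleapis.com", "organizations"), ("GCPOrganization", "type_prefixed")),
     (("storage.googleapis.com", "buckets"), ("GCPBucket", "last"))]

def parse_full_resource_name_py_alt (full_name : String) : Option String × Option String :=
  if !(PySem.Str.startswith full_name "//") then (none, none)
  else
    let parts := (PySem.Str.splitMax? (PySem.Str.slice full_name (some 2) none) "/" 2).getD []
    if parts.length < 3 ∨ parts.getD 2 "" = "" then (none, none)
    else
      match pvNodeByType.get? (parts.getD 0 "", parts.getD 1 "") with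
      | none => (none, none)
      | some (label, id_format) =>
        -- parts[2].split("/", 1)[0]: nonempty separator, see the same note in port A
        let segment := ((PySem.Str.splitMax? (parts.getD 2 "") "/" 1).getD []).headD ""
        if id_format = "type_prefixed" then (some label, some (parts.getD 1 "" ++ "/" ++ segment))
        else (some label, some segment)

-- ===== PRECONDITION & SPEC =====
def Spec_parse_full_resource_name_py (full_name : String) (out : Option String × Option String) : Prop := out = parse_full_resource_name_py_alt full_name
instance (full_name : String) (out : Option String × Option String) : Decidable (Spec_parse_full_resource_name_py full_name out) := by unfold Spec_parse_full_resource_name_py; infer_instance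

-- ===== CLAIM (what is proved, stated in full; the proofs are below) =====
def Claim_equal_parse_full_resource_name_py : Prop := ∀ (full_name : String), Dom_parse_full_resource_name_py full_name → Spec_parse_full_resource_name_py full_name (parse_full_resource_name_py full_name)

-- ===== LEMMAS AND PROOFS =====

-- Reference form of Python's  s.split("/", m)  on char lists, used to reason about both ports.
def pvSplitAux : Nat → List Char → List (List Char)
  | 0, R => [R]
  | m+1, R => if '/' ∈ R then R.takeWhile (· ≠ '/') :: pvSplitAux m ((R.dropWhile (· ≠ '/')).tail) else [R]

def pvConsHead (p : List Char) : List (List Char) → List (List Char)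
  | [] => [p]
  | x :: xs => (p ++ x) :: xs

theorem pvSplitAux_ne_nil (m : Nat) (R : List Char) : pvSplitAux m R ≠ [] := by
  cases m <;> simp [pvSplitAux] <;> split <;> simp

theorem pvConsHead_nil (xs : List (List Char)) (h : xs ≠ []) : pvConsHead [] xs = xs := by
  cases xs <;> simp_all [pvConsHead]

theorem pvConsHead_append (p q : List Char) (xs : List (List Char)) :
    pvConsHead (p ++ q) xs = pvConsHead p (pvConsHead q xs) := by
  cases xs <;> simp [pvConsHead]

theorem pvSplitAux_cons (m : Nat) (c : Char) (R : List Char) (hc : c ≠ '/') :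
    pvSplitAux m (c :: R) = pvConsHead [c] (pvSplitAux m R) := by
  cases m with
  | zero => simp [pvSplitAux, pvConsHead]
  | succ m =>
    by_cases h : '/' ∈ R
    · have h2 : '/' ∈ c :: R := List.mem_cons_of_mem _ h
      simp [pvSplitAux, h, h2, pvConsHead, hc]
    · have h2 : ¬ '/' ∈ c :: R := by
        simp [h]; exact fun hh => absurd hh.symm hc
      simp [pvSplitAux, h, h2, pvConsHead]

theorem pv_go_spec (fuel : Nat) : ∀ (m : Nat) (R cur : List Char) (acc : List (List Char)),
    R.length < fuel →
    PySem.Chars.splitOnMax.go ['/'] fuel m R cur acc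
      = acc.reverse ++ pvConsHead cur.reverse (pvSplitAux m R) := by
  induction fuel with
  | zero => intro m R cur acc h; exact absurd h (Nat.not_lt_zero _)
  | succ fuel ih =>
    intro m R cur acc h
    cases R with
    | nil =>
      cases m <;> simp [PySem.Chars.splitOnMax.go, pvSplitAux, pvConsHead]
    | cons c rest =>
      cases m with
      | zero => simp [PySem.Chars.splitOnMax.go, pvSplitAux, pvConsHead]
      | succ m =>
        by_cases hc : c = '/'
        · subst hc
          have hp : List.isPrefixOf ['/'] ('/' :: rest) = true := by simp [List.isPrefixOf]
          rw [PySem.Chars.splitOnMax.go]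
          simp only [hp, if_true, Nat.succ_ne_zero, if_false, List.drop_succ_cons, List.drop_zero,
            Nat.add_sub_cancel]
          rw [ih _ _ _ _ (by simpa using Nat.lt_of_succ_lt_succ h)]
          have hm : '/' ∈ '/' :: rest := List.mem_cons_self
          simp [pvSplitAux, hm, pvConsHead, pvConsHead_nil _ (pvSplitAux_ne_nil m _)]
          cases hx : pvSplitAux m rest with
          | nil => exact absurd hx (pvSplitAux_ne_nil _ _)
          | cons a l => rfl
        · have hp : List.isPrefixOf ['/'] (c :: rest) = false := by
            simp [List.isPrefixOf]; exact fun hh => absurd hh.symm hc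
          rw [PySem.Chars.splitOnMax.go]
          simp only [hp, Nat.succ_ne_zero, if_false, Bool.false_eq_true]
          rw [ih _ _ _ _ (by simpa using Nat.lt_of_succ_lt_succ h)]
          rw [pvSplitAux_cons _ _ _ hc]
          simp [pvConsHead_append]

theorem pv_splitOnMax_eq (R : List Char) (m : Int) (hm : 0 ≤ m) :
    PySem.Chars.splitOnMax R ['/'] m = pvSplitAux m.toNat R := by
  rw [PySem.Chars.splitOnMax]
  rw [if_neg (by omega)]
  rw [pv_go_spec _ _ _ _ _ (Nat.lt_succ_self _)]
  simp [pvConsHead_nil _ (pvSplitAux_ne_nil _ _)]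

theorem pv_strSplit (s : String) (m : Int) (hm : 0 ≤ m) :
    PySem.Str.splitMax? s "/" m = some ((pvSplitAux m.toNat s.toList).map String.ofList) := by
  rw [PySem.Str.splitMax?]
  have : ("/" : String).toList = ['/'] := by decide
  rw [this]
  rw [PySem.Chars.splitMax?]
  simp [pv_splitOnMax_eq _ _ hm]

theorem pv_sw_true (s p : String) (h : p.toList <+: s.toList) :
    PySem.Str.startswith s p = true := by
  rw [PySem.Str.startswith_eq]; exact (PySem.Chars.startswith_iff _ _).mpr h

theorem pv_sw_false (s p : String) (h : ¬ p.toList <+: s.toList) :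
    PySem.Str.startswith s p = false := by
  rw [PySem.Str.startswith_eq]
  exact Bool.eq_false_iff.mpr (fun hh => h ((PySem.Chars.startswith_iff _ _).mp hh))

theorem pv_slice_toList (s : String) (a : Int) (h : 0 ≤ a) :
    (PySem.Str.slice s (some a) none).toList = s.toList.drop a.toNat := by
  simp [PySem.List.slice_from _ h]

theorem pvSplitAux_noslash (m : Nat) (D R : List Char) (hD : '/' ∉ D) :
    pvSplitAux (m+1) (D ++ '/' :: R) = D :: pvSplitAux m R := by
  induction D with
  | nil => simp [pvSplitAux]
  | cons c D ih =>
    have hc : c ≠ '/' := fun hc => hD (hc ▸ List.mem_cons_self)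
    have hD' : '/' ∉ D := fun hm => hD (List.mem_cons_of_mem _ hm)
    rw [List.cons_append, pvSplitAux_cons _ _ _ hc, ih hD']
    simp [pvConsHead]

theorem pv_dropWhile_head_false (p : Char → Bool) (R : List Char) (c : Char) (t : List Char)
    (h : R.dropWhile p = c :: t) : p c = false := by
  induction R with
  | nil => simp [List.dropWhile] at h
  | cons a l ih =>
    rw [List.dropWhile_cons] at h
    split at h
    · exact ih h
    · cases h
      rename_i hpa
      simpa using hpa

theorem pv_split_shape (R : List Char) (h : '/' ∈ R) :
    R = R.takeWhile (· ≠ '/') ++ '/' :: (R.dropWhile (· ≠ '/')).tail := by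
  have hne : R.dropWhile (fun c => decide (c ≠ '/')) ≠ [] := by
    intro hnil
    have := List.dropWhile_eq_nil_iff.mp hnil
    simpa using this '/' h
  obtain ⟨c, t, hct⟩ := List.exists_cons_of_ne_nil hne
  have hc : c = '/' := by
    have := pv_dropWhile_head_false _ _ _ _ hct
    simpa using this
  subst hc
  conv_lhs => rw [← List.takeWhile_append_dropWhile (p := fun c => decide (c ≠ '/')) (l := R)]
  rw [hct]
  simp

-- B evaluated on a name of the shape  //dom/ty/rest  (dom, ty slash-free).
theorem pv_alt_of_match (s dom ty : String) (rest : List Char)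
    (hL : s.toList = '/' :: '/' :: (dom.toList ++ '/' :: (ty.toList ++ '/' :: rest)))
    (hdom : '/' ∉ dom.toList) (hty : '/' ∉ ty.toList) :
    parse_full_resource_name_py_alt s =
      if rest = [] then (none, none)
      else
        match pvNodeByType.get? (dom, ty) with
        | none => (none, none)
        | some (label, id_format) =>
          if id_format = "type_prefixed" then
            (some label, some (ty ++ "/" ++ ((PySem.Str.splitMax? (String.ofList rest) "/" 1).getD []).headD ""))
          else (some label, some (((PySem.Str.splitMax? (String.ofList rest) "/" 1).getD []).headD "")) := by
  have hsw : PySem.Str.startswith s "//" = true := by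
    apply pv_sw_true
    rw [hL]; exact ⟨_, rfl⟩
  have hdrop : (PySem.Str.slice s (some 2) none).toList
      = dom.toList ++ '/' :: (ty.toList ++ '/' :: rest) := by
    rw [pv_slice_toList _ _ (by omega), hL]; rfl
  have hsplit : (PySem.Str.splitMax? (PySem.Str.slice s (some 2) none) "/" 2).getD []
      = [dom, ty, String.ofList rest] := by
    rw [pv_strSplit _ _ (by omega), hdrop]
    rw [show ((2:Int).toNat) = 1 + 1 by rfl, pvSplitAux_noslash _ _ _ hdom,
      pvSplitAux_noslash _ _ _ hty]
    simp [pvSplitAux]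
  rw [parse_full_resource_name_py_alt, hsw]
  simp only [Bool.not_true, Bool.false_eq_true, if_false, hsplit]
  by_cases hrest : rest = []
  · subst hrest
    simp [List.getD]
  · have hne : String.ofList rest ≠ "" := by
      intro hh
      apply hrest
      have := congrArg String.toList hh
      simpa using this
    simp only [List.getD, List.length_cons, List.length_nil, hne, List.getElem?_cons_succ,
      List.getElem?_cons_zero, Option.getD_some]
    rw [if_neg (by simp [hne]), if_neg hrest]

theorem pv_loopA_skip (pre label fmt : String) (rows : List (String × String × String)) (s : String)
    (h : ¬ pre.toList <+: s.toList) :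
    pvLoopA ((pre, label, fmt) :: rows) s = pvLoopA rows s := by
  have h' : PySem.Str.startswith s pre = false := pv_sw_false _ _ h
  simp only [pvLoopA, h', Bool.not_false, if_true]

-- When row (pre,label,fmt) matches, A returns the row's value.
theorem pv_loopA_hit (pre label fmt : String) (rows : List (String × String × String)) (s : String)
    (rest : List Char) (hlen : pre.toList.length = (PySem.Str.len pre).toNat)
    (hL : s.toList = pre.toList ++ rest) :
    pvLoopA ((pre, label, fmt) :: rows) s =
      if rest = [] then (none, none)
      else
        if fmt = "type_prefixed" then
          (some label, some (pvRsplitSlashLast (pvRstripSlash pre) ++ "/" ++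
            ((PySem.Str.splitMax? (String.ofList rest) "/" 1).getD []).headD ""))
        else (some label, some (((PySem.Str.splitMax? (String.ofList rest) "/" 1).getD []).headD "")) := by
  have hsw : PySem.Str.startswith s pre = true := pv_sw_true _ _ ⟨rest, hL.symm⟩
  have hsuf : PySem.Str.slice s (some (PySem.Str.len pre)) none = String.ofList rest := by
    apply String.toList_inj.mp
    rw [pv_slice_toList _ _ ?hnn, hL, ← hlen, List.drop_left]
    · simp
    · rw [PySem.Str.len_eq]; positivity
  rw [pvLoopA, hsw]
  simp only [Bool.not_true, Bool.false_eq_true, if_false, hsuf]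
  by_cases hrest : rest = []
  · subst hrest
    simp
  · have hne : String.ofList rest ≠ "" := by
      intro hh
      apply hrest
      have := congrArg String.toList hh
      simpa using this
    rw [if_neg hne, if_neg hrest]

theorem pv_main (s : String) :
    parse_full_resource_name_py s = parse_full_resource_name_py_alt s := by
  by_cases h1 : ("//cloudresourcemanager.googleapis.com/projects/" : String).toList <+: s.toList
  · obtain ⟨rest, hrest⟩ := h1
    have hL : s.toList = '/' :: '/' :: (("cloudresourcemanager.googleapis.com" : String).toList ++ '/' :: (("projects" : String).toList ++ '/' :: rest)) := by
      rw [← hrest]; rfl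
    rw [parse_full_resource_name_py, pvTableA,
      pv_loopA_hit _ _ _ _ _ rest (by decide) hrest.symm,
      pv_alt_of_match s "cloudresourcemanager.googleapis.com" "projects" rest hL (by decide) (by decide)]
    by_cases h0 : rest = []
    · rw [if_pos h0, if_pos h0]
    · rw [if_neg h0, if_neg h0]
      rfl
  by_cases h2 : ("//cloudresourcemanager.googleapis.com/folders/" : String).toList <+: s.toList
  · obtain ⟨rest, hrest⟩ := h2
    have hL : s.toList = '/' :: '/' :: (("cloudresourcemanager.googleapis.com" : String).toList ++ '/' :: (("folders" : String).toList ++ '/' :: rest)) := by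
      rw [← hrest]; rfl
    rw [parse_full_resource_name_py, pvTableA,
      pv_loopA_skip _ _ _ _ _ h1,
      pv_loopA_hit _ _ _ _ _ rest (by decide) hrest.symm,
      pv_alt_of_match s "cloudresourcemanager.googleapis.com" "folders" rest hL (by decide) (by decide)]
    by_cases h0 : rest = []
    · rw [if_pos h0, if_pos h0]
    · rw [if_neg h0, if_neg h0]
      rfl
  by_cases h3 : ("//cloudresourcemanager.googleapis.com/organizations/" : String).toList <+: s.toList
  · obtain ⟨rest, hrest⟩ := h3
    have hL : s.toList = '/' :: '/' :: (("cloudresourcemanager.googleapis.com" : String).toList ++ '/' :: (("organizations" : String).toList ++ '/' :: rest)) := by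
      rw [← hrest]; rfl
    rw [parse_full_resource_name_py, pvTableA,
      pv_loopA_skip _ _ _ _ _ h1,
      pv_loopA_skip _ _ _ _ _ h2,
      pv_loopA_hit _ _ _ _ _ rest (by decide) hrest.symm,
      pv_alt_of_match s "cloudresourcemanager.googleapis.com" "organizations" rest hL (by decide) (by decide)]
    by_cases h0 : rest = []
    · rw [if_pos h0, if_pos h0]
    · rw [if_neg h0, if_neg h0]
      rfl
  by_cases h4 : ("//storage.googleapis.com/buckets/" : String).toList <+: s.toList
  · obtain ⟨rest, hrest⟩ := h4
    have hL : s.toList = '/' :: '/' :: (("storage.googleapis.com" : String).toList ++ '/' :: (("buckets" : String).toList ++ '/' :: rest)) := by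
      rw [← hrest]; rfl
    rw [parse_full_resource_name_py, pvTableA,
      pv_loopA_skip _ _ _ _ _ h1,
      pv_loopA_skip _ _ _ _ _ h2,
      pv_loopA_skip _ _ _ _ _ h3,
      pv_loopA_hit _ _ _ _ _ rest (by decide) hrest.symm,
      pv_alt_of_match s "storage.googleapis.com" "buckets" rest hL (by decide) (by decide)]
    by_cases h0 : rest = []
    · rw [if_pos h0, if_pos h0]
    · rw [if_neg h0, if_neg h0]
      rfl
  -- no table row matches: A returns (None, None); show B does too
  have hA : parse_full_resource_name_py s = (none, none) := by
    rw [parse_full_resource_name_py, pvTableA,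
      pv_loopA_skip _ _ _ _ _ h1, pv_loopA_skip _ _ _ _ _ h2,
      pv_loopA_skip _ _ _ _ _ h3, pv_loopA_skip _ _ _ _ _ h4]
    simp only [pvLoopA]
  rw [hA]
  apply Eq.symm
  by_cases h0 : ("//" : String).toList <+: s.toList
  · obtain ⟨R, hR0⟩ := h0
    have hR : s.toList = '/' :: '/' :: R := by rw [← hR0]; rfl
    have hsw : PySem.Str.startswith s "//" = true := pv_sw_true _ _ ⟨R, hR0⟩
    have hdrop : (PySem.Str.slice s (some 2) none).toList = R := by
      rw [pv_slice_toList _ _ (by omega), hR]; rfl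
    have hparts : (PySem.Str.splitMax? (PySem.Str.slice s (some 2) none) "/" 2).getD []
        = (pvSplitAux 2 R).map String.ofList := by
      rw [pv_strSplit _ _ (by omega), hdrop]; rfl
    rw [parse_full_resource_name_py_alt, hsw]
    simp only [Bool.not_true, Bool.false_eq_true, if_false, hparts]
    by_cases hs1 : '/' ∈ R
    · by_cases hs2 : '/' ∈ (R.dropWhile (· ≠ '/')).tail
      · have hdecomp : ∃ a b R2 : List Char,
            pvSplitAux 2 R = [a, b, R2] ∧ R = a ++ '/' :: (b ++ '/' :: R2) := by
          refine ⟨R.takeWhile (· ≠ '/'), ((R.dropWhile (· ≠ '/')).tail).takeWhile (· ≠ '/'),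
            (((R.dropWhile (· ≠ '/')).tail).dropWhile (· ≠ '/')).tail, ?_, ?_⟩
          · have hs2' : '/' ∈ (List.dropWhile (fun x => !decide (x = '/')) R).tail := by
              simpa using hs2
            simp [pvSplitAux, hs1, hs2, hs2']
          · conv_rhs => rw [← pv_split_shape _ hs2]
            exact pv_split_shape R hs1
        obtain ⟨a, b, R2, hsp, hRdec⟩ := hdecomp
        rw [hsp]
        simp only [List.map]
        by_cases hc : R2 = []
        · rw [if_pos (Or.inr (by subst hc; simp [List.getD]))]
        · rw [if_neg (by simp [List.getD, hc])]
          have k1 : ¬ ((("cloudresourcemanager.googleapis.com", "projects") : String × String) = (String.ofList a, String.ofList b)) := by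
            intro heq
            rw [Prod.mk.injEq] at heq
            obtain ⟨hx, hy⟩ := heq
            have ha : a = ("cloudresourcemanager.googleapis.com" : String).toList := by
              have := congrArg String.toList hx
              simpa using this.symm
            have hb : b = ("projects" : String).toList := by
              have := congrArg String.toList hy
              simpa using this.symm
            apply h1
            refine ⟨R2, ?_⟩
            rw [hR, hRdec, ha, hb]
            rfl
          have k2 : ¬ ((("cloudresourcemanager.googleapis.com", "folders") : String × String) = (String.ofList a, String.ofList b)) := by
            intro heq
            rw [Prod.mk.injEq] at heq
            obtain ⟨hx, hy⟩ := heq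
            have ha : a = ("cloudresourcemanager.googleapis.com" : String).toList := by
              have := congrArg String.toList hx
              simpa using this.symm
            have hb : b = ("folders" : String).toList := by
              have := congrArg String.toList hy
              simpa using this.symm
            apply h2
            refine ⟨R2, ?_⟩
            rw [hR, hRdec, ha, hb]
            rfl
          have k3 : ¬ ((("cloudresourcemanager.googleapis.com", "organizations") : String × String) = (String.ofList a, String.ofList b)) := by
            intro heq
            rw [Prod.mk.injEq] at heq
            obtain ⟨hx, hy⟩ := heq
            have ha : a = ("cloudresourcemanager.googleapis.com" : String).toList := by
              have := congrArg String.toList hx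
              simpa using this.symm
            have hb : b = ("organizations" : String).toList := by
              have := congrArg String.toList hy
              simpa using this.symm
            apply h3
            refine ⟨R2, ?_⟩
            rw [hR, hRdec, ha, hb]
            rfl
          have k4 : ¬ ((("storage.googleapis.com", "buckets") : String × String) = (String.ofList a, String.ofList b)) := by
            intro heq
            rw [Prod.mk.injEq] at heq
            obtain ⟨hx, hy⟩ := heq
            have ha : a = ("storage.googleapis.com" : String).toList := by
              have := congrArg String.toList hx
              simpa using this.symm
            have hb : b = ("buckets" : String).toList := by
              have := congrArg String.toList hy
              simpa using this.symm
            apply h4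
            refine ⟨R2, ?_⟩
            rw [hR, hRdec, ha, hb]
            rfl
          have hget : pvNodeByType.get? ([String.ofList a, String.ofList b,
              String.ofList R2].getD 0 "", [String.ofList a, String.ofList b,
              String.ofList R2].getD 1 "") = none := by
            simp [List.getD, pvNodeByType, PySem.Dict.get?_mk_cons, PySem.Dict.get?, k1, k2, k3, k4]
          rw [hget]
      · have e2 : pvSplitAux 2 R
            = R.takeWhile (· ≠ '/') :: pvSplitAux 1 ((R.dropWhile (· ≠ '/')).tail) := by
          simp [pvSplitAux, hs1]
        have hs2' : '/' ∉ (List.dropWhile (fun x => !decide (x = '/')) R).tail := by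
          simpa using hs2
        have e3 : pvSplitAux 1 ((R.dropWhile (· ≠ '/')).tail)
            = [(R.dropWhile (· ≠ '/')).tail] := by
          simp [pvSplitAux, hs2, hs2']
        rw [e2, e3]
        simp only [List.map]
        rw [if_pos (Or.inl (by simp))]
    · have e1 : pvSplitAux 2 R = [R] := by simp [pvSplitAux, hs1]
      rw [e1]
      simp only [List.map]
      rw [if_pos (Or.inl (by simp))]
  · rw [parse_full_resource_name_py_alt, pv_sw_false _ _ h0]
    rw [Bool.not_false, if_pos rfl]

-- ===== VERDICT (by name: the statement is the Claim_ definition above) =====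
theorem parse_full_resource_name_py_spec : Claim_equal_parse_full_resource_name_py := by
  intro s _
  unfold Spec_parse_full_resource_name_py
  exact pv_main s
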